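-- pv_equiv track=rewrite | github.com/hzambenedetti/esp-synthesizer | scripts/gen_sine/gen_sine.py | build_full_wave
-- ===== SOURCE A (Python) =====
-- def build_full_wave(base):
--     half_wave_len = len(base) * 2;
--     full_wave = base + ([0] * (3 * len(base)));
--
--     for i in range(len(base)):
--         full_wave[half_wave_len - i] = full_wave[i];
--         full_wave[half_wave_len + i] = -full_wave[i];
--         full_wave[len(full_wave) - max(i, 1)] = -full_wave[i];
--
--
--     #Special cases
--     full_wave[len(base)] = base[len(base) - 1];
--     full_wave[half_wave_len + len(base)] = -base[len(base) - 1];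
--
--     return full_wave;
-- ===== SOURCE B (Python) =====
-- def build_full_wave(base):
--     first_half = base + [base[-1]] + base[1:][::-1]
--     return first_half + [-x for x in first_half]
-- ===== Notes on version B (the rewrite author's own statement) =====
-- stated objective: simpler
-- what changed: Replaces A's preallocated 4n buffer with index-arithmetic scatter writes and post-loop special cases by direct construction: first half = base + duplicated peak + reversed tail, second half = elementwise negation of the first half.
import Mathlib
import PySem

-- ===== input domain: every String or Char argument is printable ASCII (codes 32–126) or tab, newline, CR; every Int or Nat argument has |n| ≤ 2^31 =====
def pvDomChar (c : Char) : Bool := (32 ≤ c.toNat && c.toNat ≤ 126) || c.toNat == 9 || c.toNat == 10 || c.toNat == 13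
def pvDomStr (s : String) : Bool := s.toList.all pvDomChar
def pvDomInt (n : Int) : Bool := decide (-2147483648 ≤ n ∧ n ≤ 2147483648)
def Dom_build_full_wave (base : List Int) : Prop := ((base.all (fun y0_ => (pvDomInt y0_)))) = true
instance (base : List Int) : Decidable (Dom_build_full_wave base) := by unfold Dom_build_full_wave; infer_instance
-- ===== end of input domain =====

-- B builds the full wave directly by concatenation (base + duplicated peak + reversed tail,
-- then the elementwise negation of that first half) instead of A's index-arithmetic scatter
-- writes into a preallocated buffer: simpler, same O(n) cost.

-- ===== PORT A =====
-- one loop iteration of A (half_wave_len is fixed; fw is the buffer, i the loop index)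
def buildStep (half_wave_len : Int) (fw : List Int) (i : Int) : List Int :=
  let fw := PySem.List.pySetD fw (half_wave_len - i) (PySem.List.pyGetD fw i 0)
  let fw := PySem.List.pySetD fw (half_wave_len + i) (-(PySem.List.pyGetD fw i 0))
  PySem.List.pySetD fw (PySem.List.len fw - max i 1) (-(PySem.List.pyGetD fw i 0))

def build_full_wave (base : List Int) : List Int :=
  let half_wave_len : Int := PySem.List.len base * 2
  let full_wave : List Int := base ++ List.replicate (3 * base.length) 0
  let full_wave :=
    (PySem.List.pyRange 0 (PySem.List.len base) 1).foldl (buildStep half_wave_len) full_wave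
  let full_wave := PySem.List.pySetD full_wave (PySem.List.len base)
      (PySem.List.pyGetD base (PySem.List.len base - 1) 0)
  PySem.List.pySetD full_wave (half_wave_len + PySem.List.len base)
      (-(PySem.List.pyGetD base (PySem.List.len base - 1) 0))

-- ===== PORT B =====
def build_full_wave_alt (base : List Int) : List Int :=
  let first_half := base ++ [PySem.List.pyGetD base (-1) 0]
      ++ (PySem.List.slice base (some 1) none).reverse
  first_half ++ first_half.map (fun x => -x)

-- ===== PRECONDITION & SPEC =====
-- Pre_ excludes only the empty list, on which the Python A raises IndexError (base[len(base)-1]).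
def Pre_build_full_wave (base : List Int) : Prop := base ≠ []
instance (base : List Int) : Decidable (Pre_build_full_wave base) := by
  unfold Pre_build_full_wave; infer_instance
def pvWitness_build_full_wave : List Int := [1, 2, 3]

def Spec_build_full_wave (base : List Int) (out : List Int) : Prop := out = build_full_wave_alt base
instance (base : List Int) (out : List Int) : Decidable (Spec_build_full_wave base out) := by
  unfold Spec_build_full_wave; infer_instance

-- ===== CLAIM (what is proved, stated in full; the proofs are below) =====
def Claim_equal_build_full_wave : Prop := ∀ (base : List Int), Dom_build_full_wave base → Pre_build_full_wave base → Spec_build_full_wave base (build_full_wave base)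

-- ===== LEMMAS AND PROOFS =====
lemma getD_set (l : List Int) (i j : Nat) (a d : Int) :
    (l.set i a).getD j d = if i = j ∧ j < l.length then a else l.getD j d := by
  simp [List.getD_eq_getElem?_getD, List.getElem?_set]
  split_ifs <;> simp_all

lemma buildStep_eq (fw : List Int) (n k : Nat) (hk : k < n) (hlen : fw.length = 4*n) :
    buildStep ((n : Int) * 2) fw (k : Int)
      = ((fw.set (2*n-k) (fw.getD k 0)).set (2*n+k) (-(fw.getD k 0))).set
          (4*n - max k 1) (-(fw.getD k 0)) := by
  simp only [buildStep]
  have e1 : (n:Int)*2 - k = ((2*n-k : Nat) : Int) := by omega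
  have e2 : (n:Int)*2 + k = ((2*n+k : Nat) : Int) := by omega
  rw [e1, e2]
  simp only [PySem.List.pySetD_natCast, PySem.List.pyGetD_natCast, PySem.List.len_eq,
    List.length_set]
  rw [getD_set, if_neg (by omega)]
  have e3 : (fw.length : Int) - max (k:Int) 1 = ((4*n - max k 1 : Nat) : Int) := by omega
  rw [e3]
  simp only [PySem.List.pySetD_natCast, PySem.List.pyGetD_natCast]
  rw [getD_set, getD_set, if_neg (by simp [List.length_set]; omega), if_neg (by omega)]

def waveF (base : List Int) (k j : Nat) : Int :=
  let n := base.length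
  if j < n then base.getD j 0
  else if j + k ≤ 2*n then 0
  else if j < 2*n then base.getD (2*n - j) 0
  else if j = 2*n then -base.getD 0 0
  else if j < 2*n + k then -base.getD (j - 2*n) 0
  else if k = 1 then (if j = 4*n - 1 then -base.getD 0 0 else 0)
  else if j + k ≤ 4*n then 0
  else -base.getD (4*n - j) 0

lemma fw0_getD (base : List Int) (j : Nat) (hj : j < 4 * base.length) :
    (base ++ List.replicate (3 * base.length) 0).getD j 0
      = if j < base.length then base.getD j 0 else 0 := by
  by_cases h : j < base.length
  · rw [List.getD_append _ _ _ _ h, if_pos h]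
  · rw [List.getD_append_right _ _ _ _ (by omega), if_neg h]
    simp [List.getD]

set_option maxHeartbeats 2000000 in
lemma inv_loop (base : List Int) (hb : base ≠ []) (k : Nat) (hk1 : 1 ≤ k)
    (hk : k ≤ base.length) :
    ((PySem.List.pyRange 0 (k : Int) 1).foldl
        (buildStep ((base.length : Int) * 2)) (base ++ List.replicate (3 * base.length) 0)).length
      = 4 * base.length ∧
    ∀ j < 4 * base.length,
      ((PySem.List.pyRange 0 (k : Int) 1).foldl
        (buildStep ((base.length : Int) * 2)) (base ++ List.replicate (3 * base.length) 0)).getD j 0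
        = waveF base k j := by
  have hn : 1 ≤ base.length := List.length_pos_of_ne_nil hb
  induction k with
  | zero => omega
  | succ k ih =>
    by_cases hk0 : k = 0
    · subst hk0
      rw [show ((0+1 : Nat) : Int) = 1 by norm_num,
        show PySem.List.pyRange 0 1 1 = [(0:Int)] by decide]
      simp only [List.foldl_cons, List.foldl_nil]
      have hb0 := buildStep_eq (base ++ List.replicate (3*base.length) 0) base.length 0
        (by omega) (by simp; omega)
      simp only [Nat.cast_zero] at hb0
      rw [hb0]
      refine ⟨by simp; omega, ?_⟩
      intro j hj
      rw [getD_set, getD_set, getD_set]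
      simp only [List.length_set, List.length_append, List.length_replicate]
      rw [fw0_getD base 0 (by omega), if_pos (by omega : (0:Nat) < base.length)]
      by_cases c1 : j = 4*base.length - 1
      · rw [if_pos (by constructor <;> omega)]
        simp only [waveF]
        split_ifs <;> first | rfl | (exfalso; omega)
      · rw [if_neg (by omega)]
        by_cases c2 : j = 2*base.length
        · rw [if_pos (by constructor <;> omega)]
          simp only [waveF]
          split_ifs <;> first | rfl | (exfalso; omega)
        · rw [if_neg (by omega), if_neg (by omega), fw0_getD base j (by omega)]
          simp only [waveF]
          split_ifs <;> first | rfl | (exfalso; omega) | (congr 1 <;> omega) | (congr 1; congr 1 <;> omega) | (congr 1; congr 1; congr 1 <;> omega)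
    · have hk' : 1 ≤ k := by omega
      obtain ⟨ihlen, ihchar⟩ := ih hk' (by omega)
      rw [show ((k+1 : Nat) : Int) = (k:Int) + 1 by push_cast; ring,
        PySem.List.pyRange_one_succ_right (by omega : (0:Int) ≤ (k:Int)), List.foldl_append]
      simp only [List.foldl_cons, List.foldl_nil]
      rw [buildStep_eq _ base.length k (by omega) ihlen]
      set r := (PySem.List.pyRange 0 (k : Int) 1).foldl
        (buildStep ((base.length : Int) * 2)) (base ++ List.replicate (3 * base.length) 0) with hr
      constructor
      · simp [ihlen]
      · intro j hj
        rw [getD_set, getD_set, getD_set]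
        simp only [List.length_set, ihlen]
        have hrk : r.getD k 0 = base.getD k 0 := by
          rw [ihchar k (by omega)]
          simp only [waveF]; rw [if_pos (by omega)]
        rw [hrk]
        by_cases c1 : j = 4*base.length - max k 1
        · rw [if_pos (by constructor <;> omega)]
          simp only [waveF]
          split_ifs <;> first | rfl | omega | (exfalso; omega) | (congr 1 <;> omega) | (congr 1; congr 1 <;> omega) | (congr 1; congr 1; congr 1 <;> omega)
        · rw [if_neg (by omega)]
          by_cases c2 : j = 2*base.length + k
          · rw [if_pos (by constructor <;> omega)]
            simp only [waveF]
            split_ifs <;> first | rfl | omega | (exfalso; omega) | (congr 1 <;> omega) | (congr 1; congr 1 <;> omega) | (congr 1; congr 1; congr 1 <;> omega)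
          · rw [if_neg (by omega)]
            by_cases c3 : j = 2*base.length - k
            · rw [if_pos (by constructor <;> omega)]
              simp only [waveF]
              split_ifs <;> first | rfl | omega | (exfalso; omega) | (congr 1 <;> omega) | (congr 1; congr 1 <;> omega) | (congr 1; congr 1; congr 1 <;> omega)
            · rw [if_neg (by omega), ihchar j hj]
              simp only [waveF]
              split_ifs <;> first | rfl | omega | (exfalso; omega) | (congr 1 <;> omega) | (congr 1; congr 1 <;> omega) | (congr 1; congr 1; congr 1 <;> omega)

-- B's first half, element by element
lemma fh_getD (base : List Int) (hb : base ≠ []) (j : Nat) (hj : j < 2 * base.length) :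
    (base ++ [PySem.List.pyGetD base (-1) 0]
      ++ (PySem.List.slice base (some 1) none).reverse).getD j 0
    = (if j < base.length then base.getD j 0
       else if j = base.length then base.getD (base.length - 1) 0
       else base.getD (2 * base.length - j) 0) := by
  have hn : 1 ≤ base.length := List.length_pos_of_ne_nil hb
  rw [PySem.List.slice_from_one, ← List.drop_one,
    PySem.List.pyGetD_neg_one base 0 hb, List.getLast_eq_getElem]
  rw [List.append_assoc]
  by_cases h1 : j < base.length
  · rw [List.getD_append _ _ _ _ h1, if_pos h1]
  · rw [List.getD_append_right _ _ _ _ (by omega)]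
    by_cases h2 : j = base.length
    · subst h2
      rw [Nat.sub_self]
      simp only [List.singleton_append, List.getD_cons_zero]
      rw [if_true, List.getD_eq_getElem _ _ (by omega : base.length - 1 < base.length), if_neg h1]
    · rw [if_neg h1, if_neg h2]
      have hlr : ((base.drop 1).reverse).length = base.length - 1 := by simp
      rw [show j - base.length = (j - base.length - 1) + 1 from by omega]
      simp only [List.singleton_append, List.getD_cons_succ]
      rw [List.getD_eq_getElem _ _ (by rw [hlr]; omega), List.getElem_reverse,
        List.getElem_drop, List.getD_eq_getElem _ _ (by omega)]
      congr 1
      simp only [List.length_drop]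
      omega
lemma alt_getD (base : List Int) (hb : base ≠ []) (j : Nat) (hj : j < 4 * base.length) :
    (build_full_wave_alt base).getD j 0
    = (if j < 2*base.length
       then (if j < base.length then base.getD j 0
             else if j = base.length then base.getD (base.length - 1) 0
             else base.getD (2 * base.length - j) 0)
       else -(if j - 2*base.length < base.length then base.getD (j - 2*base.length) 0
              else if j - 2*base.length = base.length then base.getD (base.length - 1) 0
              else base.getD (2 * base.length - (j - 2*base.length)) 0)) := by
  have hn : 1 ≤ base.length := List.length_pos_of_ne_nil hb
  have hfhlen : (base ++ [PySem.List.pyGetD base (-1) 0]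
      ++ (PySem.List.slice base (some 1) none).reverse).length = 2 * base.length := by
    simp [PySem.List.slice_from_one, ← List.drop_one]; omega
  simp only [build_full_wave_alt]
  by_cases h : j < 2*base.length
  · rw [List.getD_append _ _ _ _ (by rw [hfhlen]; omega), if_pos h, fh_getD base hb j h]
  · rw [List.getD_append_right _ _ _ _ (by rw [hfhlen]; omega), hfhlen, if_neg h,
      List.getD_eq_getElem _ _ (by rw [List.length_map, hfhlen]; omega),
      List.getElem_map, ← List.getD_eq_getElem _ 0 (by rw [hfhlen]; omega),
      fh_getD base hb _ (by omega)]

set_option maxHeartbeats 2000000 in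
theorem build_full_wave_ext (base : List Int) (hb : base ≠ []) :
    build_full_wave base = build_full_wave_alt base := by
  have hn : 1 ≤ base.length := List.length_pos_of_ne_nil hb
  obtain ⟨hlen, hchar⟩ := inv_loop base hb base.length hn le_rfl
  have haltlen : (build_full_wave_alt base).length = 4 * base.length := by
    simp [build_full_wave_alt, PySem.List.slice_from_one, ← List.drop_one]; omega
  simp only [build_full_wave, PySem.List.len_eq]
  rw [show ((base.length:Int)) - 1 = (((base.length - 1 : Nat)) : Int) from by omega,
    PySem.List.pyGetD_natCast, PySem.List.pySetD_natCast,
    show ((base.length:Int))*2 + base.length = (((3*base.length : Nat)) : Int) from by push_cast; ring,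
    PySem.List.pySetD_natCast]
  apply List.ext_getElem
  · simp only [List.length_set, hlen, haltlen]
  · intro j hj1 hj2
    have hj : j < 4 * base.length := by simpa [List.length_set, hlen] using hj1
    rw [← List.getD_eq_getElem _ 0 hj1, ← List.getD_eq_getElem _ 0 hj2]
    rw [getD_set, getD_set, hchar j hj, alt_getD base hb j hj]
    simp only [List.length_set, hlen, waveF]
    split_ifs <;> first | rfl | omega | (exfalso; omega) | (congr 1 <;> omega) | (congr 1; congr 1 <;> omega) | (congr 1; congr 1; congr 1 <;> omega)

-- ===== VERDICT (by name: the statement is the Claim_ definition above) =====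
theorem build_full_wave_spec : Claim_equal_build_full_wave := by
  intro base _ hpre
  unfold Spec_build_full_wave
  exact build_full_wave_ext base hpre
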